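-- pv_equiv track=rewrite | github.com/REX45-CRYPTO/hk | main.py | galois_lfsr
-- ===== SOURCE A (Python) =====
-- def galois_lfsr(seed, taps=[4, 3, 2, 0], n=4):
--     """Linear Feedback Shift Register 4-bit"""
--     reg = seed & 0xF
--     out = []
--     for _ in range(n):
--         fb = sum([(reg >> t) & 1 for t in taps]) % 2
--         reg = ((reg << 1) | fb) & 0xF
--         out.append(reg)
--     return out
-- ===== SOURCE B (Python) =====
-- def galois_lfsr(seed, taps=[4, 3, 2, 0], n=4):
--     """Linear Feedback Shift Register 4-bit, via a precomputed 16-state transition table."""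
--     if n <= 0:
--         return []
--     table = [((s << 1) | (sum((s >> t) & 1 for t in taps) % 2)) & 0xF for s in range(16)]
--     reg = seed & 0xF
--     out = []
--     for _ in range(n):
--         reg = table[reg]
--         out.append(reg)
--     return out
-- ===== Notes on version B (the rewrite author's own statement) =====
-- stated objective: alternative
-- what changed: B precomputes a 16-entry transition table over all 4-bit states once and the main loop becomes pure table lookups, instead of recomputing the tap parity sum on every step.
import Mathlib
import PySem

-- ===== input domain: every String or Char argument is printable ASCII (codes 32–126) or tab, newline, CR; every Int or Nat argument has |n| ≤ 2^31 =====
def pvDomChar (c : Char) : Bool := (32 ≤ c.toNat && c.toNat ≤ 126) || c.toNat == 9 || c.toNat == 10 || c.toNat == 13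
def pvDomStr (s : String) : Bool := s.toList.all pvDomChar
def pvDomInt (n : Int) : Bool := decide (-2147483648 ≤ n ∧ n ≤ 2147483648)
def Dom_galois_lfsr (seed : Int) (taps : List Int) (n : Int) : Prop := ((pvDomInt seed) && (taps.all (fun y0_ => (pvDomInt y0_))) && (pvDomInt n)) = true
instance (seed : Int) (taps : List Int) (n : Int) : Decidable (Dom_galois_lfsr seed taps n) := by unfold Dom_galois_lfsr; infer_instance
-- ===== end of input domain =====

-- B replaces the per-step tap-parity recomputation by a 16-entry transition table built once,
-- so the main loop is pure table lookups (objective: alternative algorithm, same cost class).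

-- ===== PORT A =====
def galois_lfsr (seed : Int) (taps : List Int) (n : Int) : List Int :=
  let reg0 := PySem.Int.band seed 15
  ((PySem.List.pyRange 0 n 1).foldl
    (fun (st : Int × List Int) _ =>
      let fb := PySem.Int.mod ((taps.map (fun t => PySem.Int.band (st.1 >>> t.toNat) 1)).sum) 2
      let reg := PySem.Int.band (PySem.Int.bor (st.1 <<< (1 : Nat)) fb) 15
      (reg, st.2 ++ [reg]))
    (reg0, [])).2

-- ===== PORT B =====
def galois_lfsr_alt (seed : Int) (taps : List Int) (n : Int) : List Int :=
  if n ≤ 0 then []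
  else
    let table := (PySem.List.pyRange 0 16 1).map (fun (s : Int) =>
      PySem.Int.band (PySem.Int.bor (s <<< (1 : Nat))
        (PySem.Int.mod ((taps.map (fun t => PySem.Int.band (s >>> t.toNat) 1)).sum) 2)) 15)
    let reg0 := PySem.Int.band seed 15
    ((PySem.List.pyRange 0 n 1).foldl
      (fun (st : Int × List Int) _ =>
        let reg := PySem.List.pyGetD table st.1 0
        (reg, st.2 ++ [reg]))
      (reg0, [])).2

-- ===== PRECONDITION & SPEC =====
-- Pre_ excludes exactly the inputs where Python raises: when at least one step runs (n > 0),
-- a negative tap makes 'reg >> t' raise ValueError (in A, and in B's table build).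
def Pre_galois_lfsr (seed : Int) (taps : List Int) (n : Int) : Prop :=
  0 < n → ∀ t ∈ taps, 0 ≤ t
instance (seed : Int) (taps : List Int) (n : Int) : Decidable (Pre_galois_lfsr seed taps n) := by unfold Pre_galois_lfsr; infer_instance

def pvWitness_galois_lfsr : Int × List Int × Int := (5, ([4, 3, 2, 0], 4))

def Spec_galois_lfsr (seed : Int) (taps : List Int) (n : Int) (out : List Int) : Prop := out = galois_lfsr_alt seed taps n
instance (seed : Int) (taps : List Int) (n : Int) (out : List Int) : Decidable (Spec_galois_lfsr seed taps n out) := by unfold Spec_galois_lfsr; infer_instance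

-- ===== CLAIM (what is proved, stated in full; the proofs are below) =====
def Claim_equal_galois_lfsr : Prop := ∀ (seed : Int) (taps : List Int) (n : Int), Dom_galois_lfsr seed taps n → Pre_galois_lfsr seed taps n → Spec_galois_lfsr seed taps n (galois_lfsr seed taps n)

-- ===== LEMMAS AND PROOFS =====

-- 'x & 0xF' is reduction mod 16 (Python-exact on negatives).
lemma pv_band15 (a : Int) : PySem.Int.band a 15 = a % 16 := by
  unfold PySem.Int.band
  have e15 : (15 : Int).toNat = 15 := rfl
  split_ifs with h1 h2 h2
  · rw [e15]
    have := Nat.and_two_pow_sub_one_eq_mod a.toNat 4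
    norm_num at this
    omega
  · norm_num at h2
  · rw [e15, Nat.and_comm]
    have h : (-a - 1).toNat &&& 15 = (-a - 1).toNat % 16 :=
      Nat.and_two_pow_sub_one_eq_mod (-a - 1).toNat 4
    omega
  · norm_num at h2

-- One step of A's loop on state reg equals B's table lookup at reg, for reg in 0..15.
lemma pv_table_lookup (taps : List Int) (reg : Int) (h0 : 0 ≤ reg) (h1 : reg < 16) :
    PySem.List.pyGetD ((PySem.List.pyRange 0 16 1).map (fun (s : Int) =>
      PySem.Int.band (PySem.Int.bor (s <<< (1 : Nat))
        (PySem.Int.mod ((taps.map (fun t => PySem.Int.band (s >>> t.toNat) 1)).sum) 2)) 15)) reg 0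
    = PySem.Int.band (PySem.Int.bor (reg <<< (1 : Nat))
        (PySem.Int.mod ((taps.map (fun t => PySem.Int.band (reg >>> t.toNat) 1)).sum) 2)) 15 := by
  exact PySem.List.pyGetD_map_pyRange_of_nonneg _ 16 reg 0 h0 h1

-- The two folds agree on any index list, starting from any 4-bit state.
lemma pv_fold_eq (taps : List Int) (l : List Int) (reg : Int) (out : List Int)
    (h0 : 0 ≤ reg) (h1 : reg < 16) :
    l.foldl
      (fun (st : Int × List Int) _ =>
        let fb := PySem.Int.mod ((taps.map (fun t => PySem.Int.band (st.1 >>> t.toNat) 1)).sum) 2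
        let r := PySem.Int.band (PySem.Int.bor (st.1 <<< (1 : Nat)) fb) 15
        (r, st.2 ++ [r])) (reg, out)
    = l.foldl
      (fun (st : Int × List Int) _ =>
        let r := PySem.List.pyGetD ((PySem.List.pyRange 0 16 1).map (fun (s : Int) =>
          PySem.Int.band (PySem.Int.bor (s <<< (1 : Nat))
            (PySem.Int.mod ((taps.map (fun t => PySem.Int.band (s >>> t.toNat) 1)).sum) 2)) 15)) st.1 0
        (r, st.2 ++ [r])) (reg, out) := by
  induction l generalizing reg out with
  | nil => rfl
  | cons x xs ih =>
    simp only [List.foldl_cons]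
    rw [pv_table_lookup taps reg h0 h1]
    set r := PySem.Int.band (PySem.Int.bor (reg <<< (1 : Nat))
      (PySem.Int.mod ((taps.map (fun t => PySem.Int.band (reg >>> t.toNat) 1)).sum) 2)) 15 with hr
    have hmod : r = (PySem.Int.bor (reg <<< (1 : Nat))
      (PySem.Int.mod ((taps.map (fun t => PySem.Int.band (reg >>> t.toNat) 1)).sum) 2)) % 16 := pv_band15 _
    exact ih r (out ++ [r]) (by omega) (by omega)

-- ===== VERDICT (by name: the statement is the Claim_ definition above) =====
theorem galois_lfsr_spec : Claim_equal_galois_lfsr := by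
  intro seed taps n _ _
  unfold Spec_galois_lfsr galois_lfsr galois_lfsr_alt
  by_cases hn : n ≤ 0
  · simp [hn, PySem.List.pyRange_one_eq_nil (by omega : n ≤ 0)]
  · simp only [if_neg hn]
    have h := pv_band15 seed
    rw [pv_fold_eq taps _ (PySem.Int.band seed 15) [] (by omega) (by omega)]
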